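-- pv_equiv track=rewrite | github.com/BillionsRichard/pycharmWorkspace | leetcode/medium/substr_with_removing_n_chars/srcs/answer.py | get_remove_len
-- ===== SOURCE A (Python) =====
-- def get_remove_len(node_pth: list) -> int:
--     reversed_pth = list(reversed(node_pth))
--     pth_len = 0
--     lst_node = reversed_pth[0]
--     for node in reversed_pth[1:]:
--         pth_len += (lst_node - node - 1)
--         lst_node = node
--
--     return pth_len
-- ===== SOURCE B (Python) =====
-- def get_remove_len(node_pth: list) -> int:
--     # Telescoping closed form: the per-step gaps sum to last - first - (n - 1)
--     # over the reversed path: last element minus first element minus (len - 1).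
--     return node_pth[-1] - node_pth[0] - (len(node_pth) - 1)
-- ===== Notes on version B (the rewrite author's own statement) =====
-- stated objective: faster
-- what changed: Replaced the loop over consecutive reversed-path pairs by the telescoping closed form: last element minus first element minus (len minus 1).
import Mathlib
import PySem

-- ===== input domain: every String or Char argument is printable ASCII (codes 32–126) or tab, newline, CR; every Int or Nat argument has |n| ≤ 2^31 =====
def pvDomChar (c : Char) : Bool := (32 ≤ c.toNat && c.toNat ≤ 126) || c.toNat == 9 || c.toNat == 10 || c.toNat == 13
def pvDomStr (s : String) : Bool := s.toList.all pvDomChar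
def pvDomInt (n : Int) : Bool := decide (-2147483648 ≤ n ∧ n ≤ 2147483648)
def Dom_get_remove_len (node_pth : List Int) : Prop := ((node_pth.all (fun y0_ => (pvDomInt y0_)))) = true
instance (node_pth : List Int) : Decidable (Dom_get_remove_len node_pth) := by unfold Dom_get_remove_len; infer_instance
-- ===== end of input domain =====

-- B replaces A's loop over consecutive reversed-path pairs by the telescoping
-- closed form last-element minus first-element minus (len - 1) (objective: faster, O(1) vs O(n)).

-- ===== PORT A =====
-- reversed_pth = list(reversed(node_pth)); lst_node = reversed_pth[0];
-- loop over reversed_pth[1:] accumulating (pth_len, lst_node).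
def get_remove_len (node_pth : List Int) : Int :=
  let reversed_pth := node_pth.reverse
  match reversed_pth with
  | [] => 0  -- unreachable under Pre_ (Python raises IndexError here)
  | lst_node :: rest =>
      (rest.foldl (fun (st : Int × Int) node => (st.1 + (st.2 - node - 1), node))
        (0, lst_node)).1

-- ===== PORT B =====
def get_remove_len_alt (node_pth : List Int) : Int :=
  (PySem.List.pyGet? node_pth (-1)).getD 0
    - (PySem.List.pyGet? node_pth 0).getD 0
    - ((node_pth.length : Int) - 1)

-- ===== PRECONDITION & SPEC =====
-- Pre_ excludes exactly the empty list, on which A raises IndexError (reversed_pth[0]).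
def Pre_get_remove_len (node_pth : List Int) : Prop := node_pth ≠ []
instance (node_pth : List Int) : Decidable (Pre_get_remove_len node_pth) := by
  unfold Pre_get_remove_len; infer_instance
def pvWitness_get_remove_len : List Int := [3, 7, 12]
def Spec_get_remove_len (node_pth : List Int) (out : Int) : Prop := out = get_remove_len_alt node_pth
instance (node_pth : List Int) (out : Int) : Decidable (Spec_get_remove_len node_pth out) := by unfold Spec_get_remove_len; infer_instance

-- ===== CLAIM (what is proved, stated in full; the proofs are below) =====
def Claim_equal_get_remove_len : Prop := ∀ (node_pth : List Int), Dom_get_remove_len node_pth → Pre_get_remove_len node_pth → Spec_get_remove_len node_pth (get_remove_len node_pth)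

-- ===== LEMMAS AND PROOFS =====

-- The loop telescopes: starting from (acc, x), folding over xs yields
-- acc + x - (last element of x::xs) - |xs|.
theorem gr_foldl_telescope (xs : List Int) (x acc : Int) :
    (xs.foldl (fun (st : Int × Int) node => (st.1 + (st.2 - node - 1), node))
      (acc, x)).1 = acc + x - xs.getLastD x - (xs.length : Int) := by
  induction xs generalizing x acc with
  | nil => simp
  | cons y ys ih =>
    simp only [List.foldl_cons, ih, List.getLastD_cons, List.length_cons]
    push_cast
    ring

theorem gr_getLastD_reverse (y : Int) (ys : List Int) (x : Int) :
    ((y :: ys).reverse).getLastD x = y := by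
  simp [List.getLastD_eq_getLast?, List.getLast?_reverse]

theorem get_remove_len_spec : Claim_equal_get_remove_len := by
  intro l _ hpre
  unfold Spec_get_remove_len get_remove_len get_remove_len_alt
  match l with
  | [] => exact absurd rfl hpre
  | y :: ys =>
    obtain ⟨r0, rtail, hr⟩ : ∃ r0 rtail, (y :: ys).reverse = r0 :: rtail :=
      List.exists_cons_of_ne_nil (by simp)
    simp only [hr]
    have hlast : rtail.getLastD r0 = y := by
      have := gr_getLastD_reverse y ys r0
      rwa [hr, List.getLastD_cons] at this
    have hlen : rtail.length = ys.length := by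
      have := congrArg List.length hr
      simp at this
      omega
    have hget : PySem.List.pyGet? (y :: ys) (-1) = some r0 := by
      rw [PySem.List.pyGet?_neg_one, ← List.head?_reverse, hr]
      rfl
    rw [gr_foldl_telescope, hlast, hlen, hget, PySem.List.pyGet?_zero_cons]
    simp only [Option.getD_some, List.length_cons]
    push_cast
    ring
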